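-- pv_equiv track=rewrite | github.com/yzmccc/yzm | preprocess.py | y_to_pure_num
-- ===== SOURCE A (Python) =====
-- def y_to_pure_num(y_solid_alphabet):
--     finall_num_y_pack = []
--     for i in y_solid_alphabet:
--         if i in ['0', '1', '2', '3', '4', '5', '6', '7', '8', '9']:
--             finall_num_y_pack.append(int(i))
--         elif i in ['a', 'b', 'c', 'd', 'e', 'f', 'g', 'h', 'i', 'j', 'k', 'l', 'm', 'n', 'o', 'p', 'q', 'r', 's',
--                       't', 'u', 'v', 'w', 'x', 'y', 'z']:
--             finall_num_y_pack.append(int(ord(i) - 87))  # a是ascii97号,10到35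
--         elif i in ['A', 'B', 'C', 'D', 'E', 'F', 'G', 'H', 'I', 'J', 'K', 'L', 'M', 'N', 'O', 'P', 'Q', 'R', 'S',
--                       'T', 'U', 'V', 'W', 'X', 'Y', 'Z']:
--             finall_num_y_pack.append(int(ord(i) - 29))  # A是ascii65号，36到61号
--     return finall_num_y_pack
-- ===== SOURCE B (Python) =====
-- BASE62 = "0123456789abcdefghijklmnopqrstuvwxyzABCDEFGHIJKLMNOPQRSTUVWXYZ"
--
--
-- def y_to_pure_num(y_solid_alphabet):
--     # Phase 1: index the input once: element -> list of positions.
--     positions = {}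
--     for i, s in enumerate(y_solid_alphabet):
--         positions.setdefault(s, []).append(i)
--     # Phase 2: walk the alphabet (outer loop) and stamp each value into the
--     # slots of the positions holding that character.
--     slots = [None] * len(y_solid_alphabet)
--     for value, ch in enumerate(BASE62):
--         for i in positions.get(ch, []):
--             slots[i] = value
--     # Phase 3: compact, dropping positions that held no base-62 character.
--     return [v for v in slots if v is not None]
-- ===== Notes on version B (the rewrite author's own statement) =====
-- stated objective: alternative
-- what changed: Inverts the loop structure: instead of classifying each input element with three membership tests plus offset arithmetic, B builds a position index of the input once, then iterates over the base-62 alphabet (outer loop) stamping each value into a slot array at the indexed positions, and compacts the slots.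
import Mathlib
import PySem

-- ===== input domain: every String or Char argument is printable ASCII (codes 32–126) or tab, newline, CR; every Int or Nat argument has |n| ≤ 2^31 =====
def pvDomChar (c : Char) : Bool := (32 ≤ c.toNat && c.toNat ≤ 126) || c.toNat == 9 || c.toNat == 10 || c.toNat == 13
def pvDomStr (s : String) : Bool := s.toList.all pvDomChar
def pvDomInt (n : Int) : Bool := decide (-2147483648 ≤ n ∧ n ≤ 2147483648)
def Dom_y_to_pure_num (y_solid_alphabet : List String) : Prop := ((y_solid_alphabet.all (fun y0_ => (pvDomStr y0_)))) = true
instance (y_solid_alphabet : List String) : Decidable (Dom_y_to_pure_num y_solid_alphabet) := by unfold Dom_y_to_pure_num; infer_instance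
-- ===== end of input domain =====

-- B inverts A's loop structure: it indexes input positions once, then walks the base-62
-- alphabet (outer loop) stamping values into a slot array and compacts it (objective: alternative).


-- ===== PORT A =====
def pyDigits : List String := ["0", "1", "2", "3", "4", "5", "6", "7", "8", "9"]
def pyLower : List String := ["a", "b", "c", "d", "e", "f", "g", "h", "i", "j", "k", "l", "m", "n", "o", "p", "q", "r", "s", "t", "u", "v", "w", "x", "y", "z"]
def pyUpper : List String := ["A", "B", "C", "D", "E", "F", "G", "H", "I", "J", "K", "L", "M", "N", "O", "P", "Q", "R", "S", "T", "U", "V", "W", "X", "Y", "Z"]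

-- the loop body of A; `.getD 0` only totalizes int(i) (the branch admits only digit strings,
-- where ofStr? is some), and `headD ' '` totalizes ord(i) (the branch admits only 1-char strings)
def stepA (acc : List Int) (i : String) : List Int :=
  if i ∈ pyDigits then acc ++ [(PySem.Int.ofStr? i).getD 0]
  else if i ∈ pyLower then acc ++ [((i.toList.headD ' ').toNat : Int) - 87]
  else if i ∈ pyUpper then acc ++ [((i.toList.headD ' ').toNat : Int) - 29]
  else acc

def y_to_pure_num (y_solid_alphabet : List String) : List Int :=
  y_solid_alphabet.foldl stepA []

-- ===== PORT B =====
def pvBase62 : String := "0123456789abcdefghijklmnopqrstuvwxyzABCDEFGHIJKLMNOPQRSTUVWXYZ"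

-- phase 1: positions.setdefault(s, []).append(i)  ≡  positions[s] = positions.get(s, []) + [i]
def pvPositions (ys : List String) : PySem.Dict String (List Int) :=
  (PySem.List.enumerate ys).foldl (fun d p => d.modify p.2 [] (· ++ [p.1])) PySem.Dict.empty

def y_to_pure_num_alt (y_solid_alphabet : List String) : List Int :=
  let positions := pvPositions y_solid_alphabet
  -- phase 2: slots = [None]*len(ys); for value, ch in enumerate(BASE62): for i in positions.get(ch, []): slots[i] = value
  let slots0 : List (Option Int) := List.replicate y_solid_alphabet.length none
  let slots := (PySem.List.enumerate pvBase62.toList).foldl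
      (fun sl p => (positions.getD (String.ofList [p.2]) []).foldl
        (fun sl2 i => PySem.List.pySetD sl2 i (some p.1)) sl) slots0
  -- phase 3: [v for v in slots if v is not None]
  slots.filterMap id

-- ===== PRECONDITION & SPEC =====
def Spec_y_to_pure_num (y_solid_alphabet : List String) (out : List Int) : Prop := out = y_to_pure_num_alt y_solid_alphabet
instance (y_solid_alphabet : List String) (out : List Int) : Decidable (Spec_y_to_pure_num y_solid_alphabet out) := by unfold Spec_y_to_pure_num; infer_instance

-- ===== CLAIM (what is proved, stated in full; the proofs are below) =====
def Claim_equal_y_to_pure_num : Prop := ∀ (y_solid_alphabet : List String), Dom_y_to_pure_num y_solid_alphabet → Spec_y_to_pure_num y_solid_alphabet (y_to_pure_num y_solid_alphabet)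

-- ===== LEMMAS AND PROOFS =====

-- the value B's alphabet walk leaves at a slot whose element is s (last stamp wins)
def pvVal (L : List (Int × Char)) (acc : Option Int) (s : String) : Option Int :=
  L.foldl (fun a p => if s = String.ofList [p.2] then some p.1 else a) acc

def pvE : List (Int × Char) := PySem.List.enumerate pvBase62.toList

-- positions.get(t, []) is exactly the enumerate indices whose element equals t, in order
lemma getD_pvPositions (ys : List String) (t : String) :
    (pvPositions ys).getD t []
      = ((PySem.List.enumerate ys).filter (fun p => p.2 == t)).map (·.1) := by
  unfold pvPositions
  have h : (((PySem.List.enumerate ys).map (fun p => (p.2, p.1))).foldl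
        (fun d (p : String × Int) => d.modify p.1 [] (· ++ [p.2]))
        (PySem.Dict.empty : PySem.Dict String (List Int)))
      = (PySem.List.enumerate ys).foldl (fun d p => d.modify p.2 [] (· ++ [p.1])) PySem.Dict.empty := by
    rw [List.foldl_map]
  rw [← h, PySem.Dict.getD_foldl_modify_append]
  simp [List.filter_map, List.map_map, Function.comp_def]

-- where each index of the enumerate-filter list comes from
lemma mem_filter_enum (ys : List String) (t : String) (s0 j : Int) :
    j ∈ (((PySem.List.enumerate ys s0).filter (fun p => p.2 == t)).map (·.1))
      ↔ ∃ k : Nat, ys[k]? = some t ∧ j = s0 + k := by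
  induction ys generalizing s0 with
  | nil => simp [PySem.List.enumerate_nil]
  | cons a l ih =>
    rw [PySem.List.enumerate_cons]
    by_cases ha : a = t
    · simp only [List.filter_cons, ha]
      simp only [BEq.rfl, if_true, List.map_cons, List.mem_cons, ih]
      constructor
      · rintro (rfl | ⟨k, hk, rfl⟩)
        · exact ⟨0, by simp, by simp⟩
        · exact ⟨k+1, by simpa using hk, by push_cast; ring⟩
      · rintro ⟨k, hk, rfl⟩
        cases k with
        | zero => left; simp
        | succ k => right; exact ⟨k, by simpa using hk, by push_cast; ring⟩
    · simp only [List.filter_cons]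
      rw [if_neg (by simpa using ha)]
      rw [ih]
      constructor
      · rintro ⟨k, hk, rfl⟩
        exact ⟨k+1, by simpa using hk, by push_cast; ring⟩
      · rintro ⟨k, hk, rfl⟩
        cases k with
        | zero => simp at hk; exact absurd hk ha
        | succ k => exact ⟨k, by simpa using hk, by push_cast; ring⟩

-- stamping `some v` at all indices of idxs, pointwise
lemma foldl_set_getElem? (idxs : List Int) (sl : List (Option Int)) (v : Int)
    (hr : ∀ i ∈ idxs, 0 ≤ i ∧ i < sl.length) (j : Nat) :
    (idxs.foldl (fun s i => PySem.List.pySetD s i (some v)) sl)[j]?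
      = if (j : Int) ∈ idxs then some (some v) else sl[j]? := by
  induction idxs generalizing sl with
  | nil => simp
  | cons i is ih =>
    simp only [List.foldl_cons]
    have hi := hr i (by simp)
    have hr' : ∀ x ∈ is, 0 ≤ x ∧ x < (PySem.List.pySetD sl i (some v)).length := by
      intro x hx
      simpa [PySem.List.length_pySetD] using hr x (by simp [hx])
    rw [ih _ hr']
    rw [PySem.List.pySetD_of_nonneg sl (some v) hi.1]
    by_cases hj : (j : Int) ∈ is
    · simp [hj]
    · have : ((j : Int) ∈ i :: is) ↔ (j : Int) = i := by simp [hj]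
      rw [List.getElem?_set]
      by_cases hji : (j : Int) = i
      · have ht : i.toNat = j := by omega
        have hlt : j < sl.length := by omega
        simp [hji, ht, hlt]
      · have hne : ¬ i.toNat = j := by omega
        simp [hj, this, hji, hne]

-- one alphabet character: the slot array stays a map over ys
lemma stamp_eq_map (ys : List String) (h : String → Option Int) (t : String) (v : Int) :
    ((pvPositions ys).getD t []).foldl (fun sl2 i => PySem.List.pySetD sl2 i (some v)) (ys.map h)
      = ys.map (fun s => if s = t then some v else h s) := by
  have hmem : ∀ j : Int, j ∈ (pvPositions ys).getD t []
      ↔ ∃ k : Nat, ys[k]? = some t ∧ j = 0 + k := by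
    intro j; rw [getD_pvPositions]; exact mem_filter_enum ys t 0 j
  have hr : ∀ i ∈ (pvPositions ys).getD t [], 0 ≤ i ∧ i < (ys.map h).length := by
    intro i hi
    obtain ⟨k, hk, rfl⟩ := (hmem i).1 hi
    have hkl : k < ys.length := by
      by_contra hk'
      simp [List.getElem?_eq_none (Nat.le_of_not_lt hk')] at hk
    refine ⟨by omega, ?_⟩
    simpa using by omega
  apply List.ext_getElem?
  intro j
  rw [foldl_set_getElem? _ _ _ hr j]
  by_cases hjl : j < ys.length
  · have h1 : ((j : Int) ∈ (pvPositions ys).getD t []) ↔ ys[j] = t := by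
      rw [hmem]
      constructor
      · rintro ⟨k, hk, hkj⟩
        have : k = j := by omega
        subst this
        simpa [List.getElem?_eq_getElem hjl] using hk
      · intro hyt
        exact ⟨j, by simp [List.getElem?_eq_getElem hjl, hyt], by omega⟩
    by_cases hyt : ys[j] = t
    · simp [h1, hyt, List.getElem?_map, List.getElem?_eq_getElem hjl]
    · simp [h1, hyt, List.getElem?_map, List.getElem?_eq_getElem hjl]
  · have h2 : ¬ ((j : Int) ∈ (pvPositions ys).getD t []) := by
      intro hc
      obtain ⟨k, hk, hkj⟩ := (hmem _).1 hc
      have hkl : k < ys.length := by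
        by_contra hk'
        simp [List.getElem?_eq_none (Nat.le_of_not_lt hk')] at hk
      omega
    simp [h2, List.getElem?_eq_none (by simpa using hjl : ys.length ≤ j),
      List.getElem?_eq_none (show (ys.map h).length ≤ j by simpa using hjl)]

-- the whole alphabet walk
lemma walk_eq_map (ys : List String) (L : List (Int × Char)) (h : String → Option Int) :
    L.foldl (fun sl p => ((pvPositions ys).getD (String.ofList [p.2]) []).foldl
        (fun sl2 i => PySem.List.pySetD sl2 i (some p.1)) sl) (ys.map h)
      = ys.map (fun s => pvVal L (h s) s) := by
  induction L generalizing h with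
  | nil => simp [pvVal]
  | cons p L ih =>
    simp only [List.foldl_cons]
    rw [stamp_eq_map, ih]
    apply List.map_congr_left
    intro s _
    simp [pvVal]

lemma alt_eq_filterMap (ys : List String) :
    y_to_pure_num_alt ys = ys.filterMap (fun s => pvVal pvE none s) := by
  unfold y_to_pure_num_alt
  have h0 : List.replicate ys.length (none : Option Int) = ys.map (fun _ => none) := by
    simp [List.map_const']
  simp only [h0]
  rw [show (PySem.List.enumerate pvBase62.toList) = pvE from rfl, walk_eq_map]
  rw [List.filterMap_map]
  rfl

lemma pvVal_none (s : String) (acc : Option Int) (L : List (Int × Char))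
    (h : ∀ p ∈ L, s ≠ String.ofList [p.2]) : pvVal L acc s = acc := by
  induction L generalizing acc with
  | nil => rfl
  | cons p L ih =>
    unfold pvVal
    simp only [List.foldl_cons]
    rw [if_neg (h p (by simp))]
    exact ih acc (fun q hq => h q (by simp [hq]))

set_option maxRecDepth 8192 in
lemma pvVal_digit (s : String) (h : s ∈ pyDigits) :
    pvVal pvE none s = some ((PySem.Int.ofStr? s).getD 0) := by
  fin_cases h <;> decide

set_option maxRecDepth 8192 in
lemma pvVal_lower (s : String) (h : s ∈ pyLower) :
    pvVal pvE none s = some (((s.toList.headD ' ').toNat : Int) - 87) := by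
  fin_cases h <;> decide

set_option maxRecDepth 8192 in
lemma pvVal_upper (s : String) (h : s ∈ pyUpper) :
    pvVal pvE none s = some (((s.toList.headD ' ').toNat : Int) - 29) := by
  fin_cases h <;> decide

set_option maxRecDepth 8192 in
lemma singles_pvE : pvE.map (fun p => String.ofList [p.2]) = pyDigits ++ pyLower ++ pyUpper := by
  decide

lemma pvVal_not_mem (s : String) (h0 : s ∉ pyDigits) (h1 : s ∉ pyLower) (h2 : s ∉ pyUpper) :
    pvVal pvE none s = none := by
  apply pvVal_none
  intro p hp hc
  have : String.ofList [p.2] ∈ pvE.map (fun p => String.ofList [p.2]) := List.mem_map_of_mem hp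
  rw [singles_pvE] at this
  subst hc
  simp only [List.mem_append] at this
  tauto

lemma foldl_stepA_eq (ys : List String) (acc : List Int) :
    ys.foldl stepA acc = acc ++ ys.filterMap (fun s => pvVal pvE none s) := by
  induction ys generalizing acc with
  | nil => simp
  | cons a t ih =>
    simp only [List.foldl_cons, List.filterMap_cons, stepA]
    by_cases h0 : a ∈ pyDigits
    · rw [if_pos h0, ih, pvVal_digit a h0]; simp
    · rw [if_neg h0]
      by_cases h1 : a ∈ pyLower
      · rw [if_pos h1, ih, pvVal_lower a h1]; simp
      · rw [if_neg h1]
        by_cases h2 : a ∈ pyUpper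
        · rw [if_pos h2, ih, pvVal_upper a h2]; simp
        · rw [if_neg h2, ih, pvVal_not_mem a h0 h1 h2]

-- ===== VERDICT (by name: the statement is the Claim_ definition above) =====
theorem y_to_pure_num_spec : Claim_equal_y_to_pure_num := by
  intro ys _
  unfold Spec_y_to_pure_num y_to_pure_num
  rw [alt_eq_filterMap]
  simpa using foldl_stepA_eq ys []
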